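-- pv_equiv track=rewrite | github.com/babenyshevs/bioinformatics | src/features/motif.py | score_motifs
-- ===== SOURCE A (Python) =====
-- from typing import Dict, List, Set, Tuple
--
-- def score_motifs(motifs: List[str]) -> int:
--     """
--     Calculate the score of a list of DNA motifs.
--
--     Args:
--     - motifs (List[str]): A list of DNA motifs.
--
--     Returns:
--     - int: The score of the motifs.
--
--     Example:
--     >>> motifs = ["ACGT", "ACGT", "ACGT"]
--     >>> score_motifs(motifs)
--     0
--     """
--     k = len(motifs[0])
--     t = len(motifs)
--     score = 0
--
--     for i in range(k):
--         column = [motif[i] for motif in motifs]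
--         max_count = max(column.count(nucleotide) for nucleotide in "ACGT")
--         score += t - max_count
--
--     return score
-- ===== SOURCE B (Python) =====
-- def score_motifs(motifs):
--     # Build the consensus first (most frequent ACGT nucleotide per column,
--     # first one in "ACGT" order on ties), then count mismatches row by row.
--     k = len(motifs[0])
--     consensus = []
--     for i in range(k):
--         column = [m[i] for m in motifs]
--         best, best_count = "A", column.count("A")
--         for n in "CGT":
--             c = column.count(n)
--             if c > best_count:
--                 best, best_count = n, c
--         consensus.append(best)
--     score = 0
--     for motif in motifs:
--         for i in range(k):
--             if motif[i] != consensus[i]: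
--                 score += 1
--     return score
-- ===== Notes on version B (the rewrite author's own statement) =====
-- stated objective: alternative
-- what changed: B first materialises the consensus string (argmax ACGT nucleotide per column) and then counts mismatches in a second, row-major pass over the motifs, instead of A's single column-major loop adding t minus the per-column maximum count; Pre_ excludes inputs on which A raises IndexError (empty list, or a motif shorter than the first).
import Mathlib
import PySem

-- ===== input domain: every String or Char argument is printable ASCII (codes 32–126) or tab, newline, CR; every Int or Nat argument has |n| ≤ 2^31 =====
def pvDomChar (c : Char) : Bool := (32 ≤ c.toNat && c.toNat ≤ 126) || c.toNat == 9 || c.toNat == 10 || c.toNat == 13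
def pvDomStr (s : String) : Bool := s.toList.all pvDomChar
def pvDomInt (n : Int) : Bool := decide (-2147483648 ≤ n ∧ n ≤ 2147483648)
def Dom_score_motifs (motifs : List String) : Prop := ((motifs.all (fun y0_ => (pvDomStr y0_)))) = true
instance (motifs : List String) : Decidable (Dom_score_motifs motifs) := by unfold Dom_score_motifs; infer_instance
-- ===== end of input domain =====

-- B builds the consensus string first and then counts mismatches row by row,
-- instead of A's column-major "t minus the column maximum" loop; same cost, different decomposition.

-- ===== PORT A =====
-- column j of the motif matrix: [motif[i] for motif in motifs] ('?' is never used inside Pre_)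
def pvColumn (motifs : List String) (i : Int) : List Char :=
  motifs.map (fun motif => (PySem.Str.pyGet? motif i).getD '?')

def score_motifs (motifs : List String) : Int :=
  let k : Int := ((motifs.headD "").toList.length : Int)
  let t : Int := (motifs.length : Int)
  (PySem.List.pyRange 0 k 1).foldl
    (fun score i =>
      let column := pvColumn motifs i
      -- max(column.count(n) for n in "ACGT"): Python's max over the 4 generated counts
      let maxCount : Int :=
        max (max (max (PySem.List.count column 'A' : Int) (PySem.List.count column 'C' : Int))
                 (PySem.List.count column 'G' : Int))
            (PySem.List.count column 'T' : Int)
      score + (t - maxCount)) 0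

-- ===== PORT B =====
-- inner loop of the consensus pass: best/best_count over "CGT", seeded with 'A'
def pvArgmax (column : List Char) : Char :=
  (['C', 'G', 'T'].foldl
    (fun (p : Char × Int) n =>
      let c : Int := (PySem.List.count column n : Int)
      if c > p.2 then (n, c) else p)
    ('A', (PySem.List.count column 'A' : Int))).1

def score_motifs_alt (motifs : List String) : Int :=
  let k : Int := ((motifs.headD "").toList.length : Int)
  let consensus : List Char :=
    (PySem.List.pyRange 0 k 1).map (fun i => pvArgmax (pvColumn motifs i))
  motifs.foldl
    (fun score motif =>
      (PySem.List.pyRange 0 k 1).foldl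
        (fun s i =>
          if (PySem.Str.pyGet? motif i).getD '?' ≠ PySem.List.pyGetD consensus i '?'
          then s + 1 else s)
        score)
    0

-- ===== PRECONDITION & SPEC =====
-- excludes exactly the inputs where Python A raises IndexError: the empty list
-- (motifs[0]) and lists containing a motif shorter than the first one (motif[i])
def Pre_score_motifs (motifs : List String) : Prop :=
  motifs ≠ [] ∧ ∀ m ∈ motifs, (motifs.headD "").toList.length ≤ m.toList.length

instance (motifs : List String) : Decidable (Pre_score_motifs motifs) := by
  unfold Pre_score_motifs; infer_instance

def pvWitness_score_motifs : List String := ["ACGT", "AAGT", "ACGA"]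

def Spec_score_motifs (motifs : List String) (out : Int) : Prop := out = score_motifs_alt motifs
instance (motifs : List String) (out : Int) : Decidable (Spec_score_motifs motifs out) := by
  unfold Spec_score_motifs; infer_instance

-- ===== CLAIM (what is proved, stated in full; the proofs are below) =====
def Claim_equal_score_motifs : Prop := ∀ (motifs : List String), Dom_score_motifs motifs → Pre_score_motifs motifs → Spec_score_motifs motifs (score_motifs motifs)

-- ===== LEMMAS AND PROOFS =====

-- the count of the argmax nucleotide is the maximum of the four counts
theorem count_pvArgmax (column : List Char) :
    (PySem.List.count column (pvArgmax column) : Int) =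
      max (max (max (PySem.List.count column 'A' : Int) (PySem.List.count column 'C' : Int))
               (PySem.List.count column 'G' : Int))
          (PySem.List.count column 'T' : Int) := by
  unfold pvArgmax
  simp only [List.foldl]
  split_ifs <;> simp_all [max_def] <;> omega

-- the mismatch count of one column against a char c is its length minus count(column, c)
theorem mismatch_sum (col : List Char) (c : Char) :
    (col.map (fun x => if x ≠ c then (1 : Int) else 0)).sum =
      (col.length : Int) - (col.count c : Int) := by
  induction col with
  | nil => simp
  | cons x col ih =>
      rw [List.map_cons, List.sum_cons, ih]
      by_cases h : x = c
      · subst h; simp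
      · simp [h]; omega

-- swap the two summations: row-major double sum = column-major double sum
theorem sum_swap_list (ms : List String) (r : List Int) (g : String → Int → Int) :
    (ms.map (fun m => (r.map (g m)).sum)).sum =
      (r.map (fun i => (ms.map (fun m => g m i)).sum)).sum := by
  induction ms with
  | nil => simp
  | cons m ms ih =>
      simp only [List.map_cons, List.sum_cons, ih]
      rw [← PySem.List.sum_map_add_int]

-- a counting foldl as a 0/1 sum
theorem foldl_if_sum (r : List Int) (p : Int → Prop) [DecidablePred p] (a : Int) :
    r.foldl (fun s i => if p i then s + 1 else s) a =
      a + (r.map (fun i => if p i then (1 : Int) else 0)).sum := by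
  induction r generalizing a with
  | nil => simp
  | cons i r ih =>
      by_cases h : p i
      · simp [List.foldl_cons, h, ih]; ring
      · simp [List.foldl_cons, h, ih]

-- B's double foldl as a double sum
theorem alt_as_sum (motifs : List String) (r : List Int) (consensus : List Char) :
    motifs.foldl
      (fun score motif =>
        r.foldl (fun s i =>
          if (PySem.Str.pyGet? motif i).getD '?' ≠ PySem.List.pyGetD consensus i '?'
          then s + 1 else s) score) 0 =
    (motifs.map (fun motif =>
      (r.map (fun i =>
        if (PySem.Str.pyGet? motif i).getD '?' ≠ PySem.List.pyGetD consensus i '?'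
        then (1 : Int) else 0)).sum)).sum := by
  have h : (fun (score : Int) (motif : String) =>
        r.foldl (fun s i =>
          if (PySem.Str.pyGet? motif i).getD '?' ≠ PySem.List.pyGetD consensus i '?'
          then s + 1 else s) score) =
      (fun (score : Int) (motif : String) =>
        score + (r.map (fun i =>
          if (PySem.Str.pyGet? motif i).getD '?' ≠ PySem.List.pyGetD consensus i '?'
          then (1 : Int) else 0)).sum) := by
    funext score motif
    exact foldl_if_sum r _ score
  rw [h, PySem.List.foldl_add]
  simp

-- ===== VERDICT (by name: the statement is the Claim_ definition above) =====
theorem score_motifs_spec : Claim_equal_score_motifs := by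
  intro motifs _ _
  unfold Spec_score_motifs score_motifs score_motifs_alt
  simp only []
  rw [alt_as_sum, sum_swap_list, PySem.List.foldl_add]
  simp only [zero_add]
  congr 1
  apply List.map_congr_left
  intro i hi
  have hib := (PySem.List.mem_pyRange_one).1 hi
  rw [PySem.List.pyGetD_map_pyRange_of_nonneg _ _ i '?' hib.1 hib.2]
  rw [show (motifs.map (fun motif =>
        if (PySem.Str.pyGet? motif i).getD '?' ≠ pvArgmax (pvColumn motifs i) then (1 : Int) else 0)) =
      ((pvColumn motifs i).map
        (fun x => if x ≠ pvArgmax (pvColumn motifs i) then (1 : Int) else 0)) from by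
    simp [pvColumn, List.map_map]]
  rw [mismatch_sum, ← PySem.List.count_eq, count_pvArgmax]
  simp [pvColumn]
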